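-- pv_equiv track=rewrite | github.com/pkrahmer/HeishaMon | pyshamon/pyshamon.py | raw_diff
-- ===== SOURCE A (Python) =====
-- def raw_diff(old, new: []):
--     hx: str = ""
--     changed = False
--     for o, n in zip(old, new):
--         if o != n:
--             hx += "\033[96m\033[1m" if not changed else ""
--             changed = True
--         else:
--             hx += "\033[0m" if changed else ""
--             changed = False
--         hx += "%0.2X " % n
--     if changed:
--         hx += "\033[0m"
--     return hx
-- ===== SOURCE B (Python) =====
-- def raw_diff(old, new: []):
--     pairs = list(zip(old, new))
--     parts = []
--     i = 0
--     while i < len(pairs):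
--         diff = pairs[i][0] != pairs[i][1]
--         j = i
--         while j < len(pairs) and (pairs[j][0] != pairs[j][1]) == diff:
--             j += 1
--         hexes = "".join("%0.2X " % n for _, n in pairs[i:j])
--         parts.append("\033[96m\033[1m" + hexes + "\033[0m" if diff else hexes)
--         i = j
--     return "".join(parts)
-- ===== Notes on version B (the rewrite author's own statement) =====
-- stated objective: alternative
-- what changed: Replaces the flat per-byte scan with a carried 'changed' flag by a run-based pass: the zipped stream is split into maximal runs of changed/unchanged pairs and each changed run is wrapped in the ANSI start/reset codes as a whole.
import Mathlib
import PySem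

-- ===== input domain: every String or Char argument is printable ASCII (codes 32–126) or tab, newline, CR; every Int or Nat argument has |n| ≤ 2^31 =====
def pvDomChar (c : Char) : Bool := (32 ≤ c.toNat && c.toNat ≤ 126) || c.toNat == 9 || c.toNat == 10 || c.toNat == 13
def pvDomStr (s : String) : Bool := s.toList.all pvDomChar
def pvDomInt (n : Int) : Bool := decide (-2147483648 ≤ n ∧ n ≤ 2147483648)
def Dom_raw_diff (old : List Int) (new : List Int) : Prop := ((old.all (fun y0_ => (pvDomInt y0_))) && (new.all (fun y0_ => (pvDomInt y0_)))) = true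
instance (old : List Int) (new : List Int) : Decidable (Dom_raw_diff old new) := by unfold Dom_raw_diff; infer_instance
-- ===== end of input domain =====

-- B replaces A's flat per-byte scan with a carried 'changed' flag by a run-based pass
-- (maximal changed/unchanged runs, each changed run wrapped as a whole); alternative decomposition, same cost.


-- ===== PORT A =====
-- hand-written port of Python's  "%0.2X" % n  (no PySem primitive): hex digits of |n|,
-- zero-padded to precision 2, '-' prefix for negative n; exact for all Int n.
def pvHexDigit (k : Nat) : Char := if k < 10 then Char.ofNat (48 + k) else Char.ofNat (55 + k)

def pvHexDigits (n : Nat) : List Char :=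
  if _h : n < 16 then [pvHexDigit n]
  else pvHexDigits (n / 16) ++ [pvHexDigit (n % 16)]
decreasing_by exact Nat.div_lt_self (by omega) (by omega)

-- "%0.2X " % n  (the trailing space included)
def pvHexFmt2 (n : Int) : String :=
  let ds := pvHexDigits n.natAbs
  let ds := if ds.length < 2 then '0' :: ds else ds
  String.ofList ((if n < 0 then '-' :: ds else ds) ++ [' '])

def raw_diff (old : List Int) (new : List Int) : String :=
  let r := (old.zip new).foldl
    (fun (st : String × Bool) on =>
      let hx := if on.1 != on.2
        then st.1 ++ (if !st.2 then "\x1B[96m\x1B[1m" else "")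
        else st.1 ++ (if st.2 then "\x1B[0m" else "")
      (hx ++ pvHexFmt2 on.2, on.1 != on.2))
    ("", false)
  if r.2 then r.1 ++ "\x1B[0m" else r.1

-- ===== PORT B =====
def pvHexJoin (ps : List (Int × Int)) : String :=
  PySem.Str.join "" (ps.map fun on => pvHexFmt2 on.2)

def raw_diff_runs : List (Int × Int) → List String
  | [] => []
  | p :: t =>
    let diff := p.1 != p.2
    let run := List.takeWhile (fun q => (q.1 != q.2) == diff) (p :: t)
    let rest := List.dropWhile (fun q => (q.1 != q.2) == diff) (p :: t)
    (if diff then "\x1B[96m\x1B[1m" ++ pvHexJoin run ++ "\x1B[0m" else pvHexJoin run)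
      :: raw_diff_runs rest
termination_by l => l.length
decreasing_by
  simp only [List.dropWhile_cons, beq_self_eq_true, if_true]
  exact Nat.lt_succ_of_le (List.length_dropWhile_le _ _)

def raw_diff_alt (old : List Int) (new : List Int) : String :=
  PySem.Str.join "" (raw_diff_runs (old.zip new))

-- ===== PRECONDITION & SPEC =====
def Spec_raw_diff (old : List Int) (new : List Int) (out : String) : Prop := out = raw_diff_alt old new
instance (old : List Int) (new : List Int) (out : String) : Decidable (Spec_raw_diff old new out) := by unfold Spec_raw_diff; infer_instance

-- ===== CLAIM (what is proved, stated in full; the proofs are below) =====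
def Claim_equal_raw_diff : Prop := ∀ (old : List Int) (new : List Int), Dom_raw_diff old new → Spec_raw_diff old new (raw_diff old new)

-- ===== LEMMAS AND PROOFS =====

-- reference: what A's loop appends from state flag c, including the trailing reset
def loopSuffix : List (Int × Int) → Bool → String
  | [], c => if c then "\x1B[0m" else ""
  | p :: t, c =>
    (if p.1 != p.2 then (if !c then "\x1B[96m\x1B[1m" else "") else (if c then "\x1B[0m" else ""))
      ++ pvHexFmt2 p.2 ++ loopSuffix t (p.1 != p.2)

theorem join_empty_cons (x : String) (l : List String) :
    PySem.Str.join "" (x :: l) = x ++ PySem.Str.join "" l := by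
  have h : (PySem.Str.join "" (x :: l)).toList = (x ++ PySem.Str.join "" l).toList := by
    cases l with
    | nil => simp [PySem.Str.toList_join, String.toList_append, PySem.Chars.join, List.intercalate]
    | cons y t =>
      simp [PySem.Str.toList_join, String.toList_append, PySem.Chars.join_cons_cons]
  simpa using congrArg String.ofList h

theorem hexJoin_cons (p : Int × Int) (t : List (Int × Int)) :
    pvHexJoin (p :: t) = pvHexFmt2 p.2 ++ pvHexJoin t := by
  simp [pvHexJoin, join_empty_cons]

theorem A_foldl_eq (ps : List (Int × Int)) : ∀ (hx : String) (c : Bool),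
    (let r := ps.foldl
      (fun (st : String × Bool) on =>
        let h := if on.1 != on.2
          then st.1 ++ (if !st.2 then "\x1B[96m\x1B[1m" else "")
          else st.1 ++ (if st.2 then "\x1B[0m" else "")
        (h ++ pvHexFmt2 on.2, on.1 != on.2)) (hx, c)
     if r.2 then r.1 ++ "\x1B[0m" else r.1) = hx ++ loopSuffix ps c := by
  induction ps with
  | nil => intro hx c; cases c <;> simp [loopSuffix]
  | cons p t ih =>
    intro hx c
    simp only [List.foldl_cons]
    rw [ih]
    cases hc : (p.1 != p.2) <;> cases c <;>
      simp [loopSuffix, hc, String.append_assoc]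

theorem dropWhile_head_false {α : Type} (p : α → Bool) (l : List α) (q : α) (t : List α)
    (h : l.dropWhile p = q :: t) : p q = false := by
  induction l with
  | nil => simp at h
  | cons x xs ih =>
    by_cases hx : p x = true
    · rw [List.dropWhile_cons_of_pos hx] at h; exact ih h
    · rw [List.dropWhile_cons_of_neg hx] at h
      cases h; simpa using hx

theorem run_const (k : Bool) (run rest : List (Int × Int))
    (h : ∀ p ∈ run, (p.1 != p.2) = k) :
    loopSuffix (run ++ rest) k = pvHexJoin run ++ loopSuffix rest k := by
  induction run with
  | nil => simp [pvHexJoin, PySem.Str.join]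
  | cons p t ih =>
    have hp : (p.1 != p.2) = k := h p (by simp)
    have ht : ∀ q ∈ t, (q.1 != q.2) = k := fun q hq => h q (by simp [hq])
    cases k <;>
      simp [loopSuffix, hp, hexJoin_cons, ih ht, String.append_assoc]

theorem run_true_start (run rest : List (Int × Int)) (hne : run ≠ [])
    (h : ∀ p ∈ run, (p.1 != p.2) = true) :
    loopSuffix (run ++ rest) false =
      "\x1B[96m\x1B[1m" ++ pvHexJoin run ++ loopSuffix rest true := by
  cases run with
  | nil => exact absurd rfl hne
  | cons q rt =>
    have hq : (q.1 != q.2) = true := h q (by simp)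
    have hrt : ∀ p ∈ rt, (p.1 != p.2) = true := fun p hp => h p (by simp [hp])
    simp [loopSuffix, hq, run_const true rt rest hrt, hexJoin_cons, String.append_assoc]

theorem after_run (rest : List (Int × Int))
    (h : rest = [] ∨ ∃ q t, rest = q :: t ∧ (q.1 != q.2) = false) :
    loopSuffix rest true = "\x1B[0m" ++ loopSuffix rest false := by
  rcases h with h | ⟨q, t, rfl, hq⟩
  · subst h; simp [loopSuffix]
  · simp [loopSuffix, hq, String.append_assoc]

theorem B_eq (ps : List (Int × Int)) :
    PySem.Str.join "" (raw_diff_runs ps) = loopSuffix ps false := by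
  induction ps using raw_diff_runs.induct with
  | case1 => simp [raw_diff_runs, PySem.Str.join, loopSuffix]
  | case2 p t diff rest ih =>
    simp only [raw_diff_runs]
    rw [join_empty_cons, ih]
    show (if (p.1 != p.2) = true
        then "\x1B[96m\x1B[1m" ++ pvHexJoin (List.takeWhile (fun q => (q.1 != q.2) == (p.1 != p.2)) (p :: t)) ++ "\x1B[0m"
        else pvHexJoin (List.takeWhile (fun q => (q.1 != q.2) == (p.1 != p.2)) (p :: t)))
      ++ loopSuffix (List.dropWhile (fun q => (q.1 != q.2) == (p.1 != p.2)) (p :: t)) false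
      = loopSuffix (p :: t) false
    cases hk : (p.1 != p.2) with
    | false =>
      simp only [Bool.false_eq_true, if_false]
      have hrun : ∀ q ∈ List.takeWhile (fun q => (q.1 != q.2) == false) (p :: t),
          (q.1 != q.2) = false := by
        intro q hq; simpa using List.mem_takeWhile_imp hq
      conv_rhs => rw [← List.takeWhile_append_dropWhile
        (p := fun q : Int × Int => (q.1 != q.2) == false) (l := p :: t)]
      rw [run_const false _ _ hrun]
    | true =>
      simp only [if_true]
      have hrun : ∀ q ∈ List.takeWhile (fun q => (q.1 != q.2) == true) (p :: t),
          (q.1 != q.2) = true := by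
        intro q hq; simpa using List.mem_takeWhile_imp hq
      have hrest : List.dropWhile (fun q : Int × Int => (q.1 != q.2) == true) (p :: t) = [] ∨
          ∃ q t', List.dropWhile (fun q : Int × Int => (q.1 != q.2) == true) (p :: t) = q :: t' ∧
            (q.1 != q.2) = false := by
        cases hd : List.dropWhile (fun q : Int × Int => (q.1 != q.2) == true) (p :: t) with
        | nil => exact Or.inl rfl
        | cons q t' =>
          refine Or.inr ⟨q, t', rfl, ?_⟩
          simpa using dropWhile_head_false _ (p :: t) q t' hd
      have hne : List.takeWhile (fun q : Int × Int => (q.1 != q.2) == true) (p :: t) ≠ [] := by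
        rw [List.takeWhile_cons_of_pos (by simp [hk])]; simp
      conv_rhs => rw [← List.takeWhile_append_dropWhile
        (p := fun q : Int × Int => (q.1 != q.2) == true) (l := p :: t)]
      rw [run_true_start _ _ hne hrun, after_run _ hrest]
      simp [String.append_assoc]

-- ===== VERDICT (by name: the statement is the Claim_ definition above) =====
theorem raw_diff_spec : Claim_equal_raw_diff := by
  intro old new _
  show raw_diff old new = raw_diff_alt old new
  unfold raw_diff raw_diff_alt
  rw [B_eq]
  simpa using A_foldl_eq (old.zip new) "" false
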